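-- pv_equiv track=rewrite | github.com/EHwooKim/Algorithms | 지난것들/4869.py | paper
-- ===== SOURCE A (Python) =====
-- def paper(n):
--     case = [1, 3]
--     for i in range(1, n - 1):
--         if i%2:
--             case.append(2 * case[i] - 1)
--         else:
--             case.append(2 * case[i] + 1)
--     return case[n-1]
-- ===== SOURCE B (Python) =====
-- def paper(n):
--     # closed form of the Jacobsthal-like recurrence: a(n) = (2**(n+1) + (-1)**n) / 3
--     return (2 ** (n + 1) + (1 if n % 2 == 0 else -1)) // 3
-- ===== Notes on version B (the rewrite author's own statement) =====
-- stated objective: faster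
-- what changed: Replaces the O(n) list-building recurrence loop with the closed form (2^(n+1)+(-1)^n)//3 computed directly.
-- intended difference: For n = 0 and n = -1 A returns 3 resp. 1 only because case[n-1] wraps around the initial two-element list (Python negative indexing), while B returns the closed-form extension 1 resp. 0, the intended value of the recurrence; the natural domain is n >= 1 where they agree. — e.g. on paper(0): A returns 3, B returns 1
import Mathlib
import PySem

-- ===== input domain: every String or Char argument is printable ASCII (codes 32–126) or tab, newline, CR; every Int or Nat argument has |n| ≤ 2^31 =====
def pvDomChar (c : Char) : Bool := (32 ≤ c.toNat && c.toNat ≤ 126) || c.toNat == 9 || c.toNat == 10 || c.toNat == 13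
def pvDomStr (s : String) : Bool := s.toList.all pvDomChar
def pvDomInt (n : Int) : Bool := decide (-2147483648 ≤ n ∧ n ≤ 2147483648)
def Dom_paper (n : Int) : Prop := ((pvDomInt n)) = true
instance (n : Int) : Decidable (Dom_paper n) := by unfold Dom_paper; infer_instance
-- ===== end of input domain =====

-- B replaces A's O(n) recurrence loop by the closed form (2^(n+1)+(-1)^n)//3 (faster).

-- ===== PORT A =====
def paper (n : Int) : Int :=
  let case0 : List Int := [1, 3]
  let case := (PySem.List.pyRange 1 (n - 1) 1).foldl
    (fun case i =>
      if PySem.Int.mod i 2 ≠ 0 then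
        case ++ [2 * PySem.List.pyGetD case i 0 - 1]
      else
        case ++ [2 * PySem.List.pyGetD case i 0 + 1]) case0
  PySem.List.pyGetD case (n - 1) 0

-- ===== PORT B =====
-- 2**(n+1) via Nat exponent: exact on Pre_ (n ≥ -1, so n+1 ≥ 0)
def paper_alt (n : Int) : Int :=
  PySem.Int.floordiv (2 ^ (n + 1).toNat + (if PySem.Int.mod n 2 = 0 then 1 else -1)) 3

-- ===== PRECONDITION & SPEC =====
-- Pre_ excludes n ≤ -2, where A raises IndexError (case[n-1] out of range of the 2-element list).
def Pre_paper (n : Int) : Prop := -1 ≤ n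
instance (n : Int) : Decidable (Pre_paper n) := by unfold Pre_paper; infer_instance
def pvWitness_paper : Int := 5

-- For n = 0 and n = -1 A returns 3 resp. 1 only because case[n-1] wraps around the initial
-- two-element list (Python negative indexing), while B returns the closed-form extension
-- 1 resp. 0, the intended value of the recurrence.
def D_paper (n : Int) : Prop := n = 0 ∨ n = -1
instance (n : Int) : Decidable (D_paper n) := by unfold D_paper; infer_instance

def Spec_paper (n : Int) (out : Int) : Prop := ¬ D_paper n → out = paper_alt n
instance (n : Int) (out : Int) : Decidable (Spec_paper n out) := by unfold Spec_paper; infer_instance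

def pvDiffWitness_paper : Int := 0
def pvDiffWitnessOut_paper : Int × Int := (3, 1)

-- ===== CLAIM =====
def Claim_unchanged_paper : Prop := ∀ (n : Int), Dom_paper n → Pre_paper n → Spec_paper n (paper n)
def Claim_changed_paper : Prop := Dom_paper (pvDiffWitness_paper) ∧ Pre_paper (pvDiffWitness_paper) ∧ D_paper (pvDiffWitness_paper) ∧ paper (pvDiffWitness_paper) = pvDiffWitnessOut_paper.1 ∧ paper_alt (pvDiffWitness_paper) = pvDiffWitnessOut_paper.2 ∧ pvDiffWitnessOut_paper.1 ≠ pvDiffWitnessOut_paper.2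
def Claim_exact_paper : Prop := ∀ (n : Int), Dom_paper n → Pre_paper n → D_paper n → paper n ≠ paper_alt n

-- ===== LEMMAS AND PROOFS =====

-- the sequence A builds: g k = case[k]
def g : Nat → Int
  | 0 => 1
  | 1 => 3
  | (k+2) => if (k+1) % 2 = 1 then 2 * g (k+1) - 1 else 2 * g (k+1) + 1

lemma three_mul_g (k : Nat) : 3 * g k = 2 ^ (k + 2) + (-1 : Int) ^ (k + 1) := by
  induction k using Nat.twoStepInduction with
  | zero => decide
  | one => decide
  | more k ih1 ih2 =>
    rcases Nat.even_or_odd k with hk | hk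
    · have hk0 : k % 2 = 0 := Nat.even_iff.mp hk
      have h1 : (k + 1) % 2 = 1 := by omega
      have e2 : (-1 : Int) ^ (k + 2) = 1 := (Nat.even_iff.mpr (by omega)).neg_one_pow
      have e3 : (-1 : Int) ^ (k + 3) = -1 := (Nat.odd_iff.mpr (by omega)).neg_one_pow
      have hg : g (k + 2) = 2 * g (k + 1) - 1 := by simp [g, h1]
      rw [e2] at ih2
      have h2 : (2:Int) ^ (k+4) = 2 * 2 ^ (k+3) := by ring
      rw [hg, e3, h2]; linarith
    · have hk0 : k % 2 = 1 := Nat.odd_iff.mp hk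
      have h1 : (k + 1) % 2 = 0 := by omega
      have e2 : (-1 : Int) ^ (k + 2) = -1 := (Nat.odd_iff.mpr (by omega)).neg_one_pow
      have e3 : (-1 : Int) ^ (k + 3) = 1 := (Nat.even_iff.mpr (by omega)).neg_one_pow
      have hg : g (k + 2) = 2 * g (k + 1) + 1 := by simp [g, h1]
      rw [e2] at ih2
      have h2 : (2:Int) ^ (k+4) = 2 * 2 ^ (k+3) := by ring
      rw [hg, e3, h2]; linarith

lemma loop_eq (m : Nat) :
    (PySem.List.pyRange 1 (1 + (m : Int)) 1).foldl
      (fun case i =>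
        if PySem.Int.mod i 2 ≠ 0 then
          case ++ [2 * PySem.List.pyGetD case i 0 - 1]
        else
          case ++ [2 * PySem.List.pyGetD case i 0 + 1]) [1, 3]
    = (List.range (m + 2)).map g := by
  induction m with
  | zero =>
    have : (1 + (0:Nat) : Int) = 1 := by norm_num
    rw [this]
    simp [List.range_succ, g]
  | succ m ih =>
    have hb : (1 + ((m+1:Nat)) : Int) = (1 + (m:Int)) + 1 := by push_cast; ring
    rw [hb, PySem.List.pyRange_one_succ_right (by omega), List.foldl_append, ih]
    have hidx : (1 + (m:Int)) = ((m+1 : Nat) : Int) := by push_cast; ring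
    have hget : PySem.List.pyGetD ((List.range (m+2)).map g) (1 + (m:Int)) 0 = g (m+1) := by
      rw [hidx, PySem.List.pyGetD_natCast]
      rw [List.getD_eq_getElem?_getD]
      simp
    have hmod : PySem.Int.mod (1 + (m:Int)) 2 = (((m+1) % 2 : Nat) : Int) := by
      rw [hidx]; exact_mod_cast PySem.Int.mod_natCast (m+1) 2
    simp only [List.foldl_cons, List.foldl_nil, hget, hmod]
    have hr : List.range (m + 1 + 2) = List.range (m + 2) ++ [m + 2] := List.range_succ
    rw [hr, List.map_append, List.map_cons, List.map_nil]
    rcases Nat.even_or_odd (m+1) with hp | hp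
    · have h0 : ((m+1) % 2 : Nat) = 0 := Nat.even_iff.mp hp
      have hc : ¬ ((((m+1) % 2 : Nat) : Int) ≠ 0) := by rw [h0]; norm_num
      rw [if_neg hc]
      have hg : g (m + 2) = 2 * g (m+1) + 1 := by simp [g, show (m+1) % 2 ≠ 1 by omega]
      rw [hg]
    · have h0 : ((m+1) % 2 : Nat) = 1 := Nat.odd_iff.mp hp
      have hc : ((((m+1) % 2 : Nat) : Int) ≠ 0) := by rw [h0]; norm_num
      rw [if_pos hc]
      have hg : g (m + 2) = 2 * g (m+1) - 1 := by simp [g, h0]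
      rw [hg]

lemma paper_eq_g (n : Int) (hn : 1 ≤ n) : paper n = g ((n - 1).toNat) := by
  show PySem.List.pyGetD
      ((PySem.List.pyRange 1 (n - 1) 1).foldl
        (fun case i =>
          if PySem.Int.mod i 2 ≠ 0 then
            case ++ [2 * PySem.List.pyGetD case i 0 - 1]
          else
            case ++ [2 * PySem.List.pyGetD case i 0 + 1]) [1, 3]) (n - 1) 0
    = g ((n - 1).toNat)
  have hrange : PySem.List.pyRange 1 (n - 1) 1
      = PySem.List.pyRange 1 (1 + ((n - 2).toNat : Int)) 1 := by
    rw [PySem.List.pyRange_one, PySem.List.pyRange_one,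
      show (n - 1 - 1).toNat = (1 + ((n - 2).toNat : Int) - 1).toNat from by omega]
  rw [hrange, loop_eq]
  rw [show (n - 1) = (((n - 1).toNat : Nat) : Int) from by omega,
    PySem.List.pyGetD_natCast, List.getD_eq_getElem?_getD]
  have hlt : (n - 1).toNat < (n - 2).toNat + 2 := by omega
  rw [List.getElem?_map, List.getElem?_range hlt]
  rfl

lemma alt_eq_g (n : Int) (hn : 1 ≤ n) : paper_alt n = g ((n - 1).toNat) := by
  unfold paper_alt
  obtain ⟨k, hk⟩ : ∃ k : Nat, n = ((k + 1 : Nat) : Int) := ⟨(n - 1).toNat, by omega⟩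
  subst hk
  rw [show ((((k + 1 : Nat) : Int)) - 1).toNat = k from by omega]
  have hpow : ((((k + 1 : Nat) : Int)) + 1).toNat = k + 2 := by omega
  have hmod : PySem.Int.mod ((k + 1 : Nat) : Int) 2 = (((k+1) % 2 : Nat) : Int) := by
    exact_mod_cast PySem.Int.mod_natCast (k+1) 2
  have hnum : 2 ^ ((((k + 1 : Nat) : Int)) + 1).toNat
      + (if PySem.Int.mod ((k + 1 : Nat) : Int) 2 = 0 then (1:Int) else -1) = 3 * g k := by
    rw [three_mul_g, hpow, hmod]
    rcases Nat.even_or_odd (k+1) with hp | hp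
    · have h0 : ((k+1) % 2 : Nat) = 0 := Nat.even_iff.mp hp
      have e : (-1 : Int) ^ (k + 1) = 1 := hp.neg_one_pow
      rw [h0, e]; norm_num
    · have h0 : ((k+1) % 2 : Nat) = 1 := Nat.odd_iff.mp hp
      have e : (-1 : Int) ^ (k + 1) = -1 := hp.neg_one_pow
      rw [h0, e]; norm_num
  rw [hnum, PySem.Int.floordiv_eq_ediv_of_pos (by norm_num)]
  exact Int.mul_ediv_cancel_left _ (by norm_num)

-- ===== VERDICT =====
theorem paper_spec : Claim_unchanged_paper := by
  intro n _ hpre hnd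
  have hn : 1 ≤ n := by
    unfold Pre_paper at hpre
    unfold D_paper at hnd
    omega
  rw [paper_eq_g n hn, alt_eq_g n hn]

theorem paper_changed : Claim_changed_paper := by
  unfold Claim_changed_paper; decide

theorem paper_tight : Claim_exact_paper := by
  intro n _ _ hd
  unfold D_paper at hd
  rcases hd with h | h <;> subst h <;> decide
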